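-- pv_equiv track=rewrite | github.com/chippanutiy/conf | main.py | build_bfs
-- ===== SOURCE A (Python) =====
-- def build_bfs(start, direct, max_depth):
--     visited = set()
--     result = {}
--
--     def rec(level_nodes, depth):
--         if depth > max_depth:
--             return
--
--         next_nodes = []
--         for node in level_nodes:
--             if node in visited:
--                 continue
--             visited.add(node)
--
--             deps = direct.get(node, [])
--             result[node] = deps
--
--             for d in deps:
--                 if d not in visited:
--                     next_nodes.append(d)
--
--         if next_nodes:
--             rec(next_nodes, depth + 1)
--
--     rec([start], 0)
--     return result
-- ===== SOURCE B (Python) =====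
-- from collections import deque
--
-- def build_bfs(start, direct, max_depth):
--     visited = set()
--     result = {}
--     queue = deque([(start, 0)])
--     while queue:
--         node, depth = queue.popleft()
--         if depth > max_depth or node in visited:
--             continue
--         visited.add(node)
--         deps = direct.get(node, [])
--         result[node] = deps
--         for d in deps:
--             if d not in visited:
--                 queue.append((d, depth + 1))
--     return result
-- ===== Notes on version B (the rewrite author's own statement) =====
-- stated objective: idiomatic
-- what changed: Replaces A's level-synchronous recursion (building a next_nodes list per layer and recursing on it) with the standard iterative BFS: a single FIFO queue of (node, depth) pairs consumed by one while-loop; FIFO order makes the visit order, depth cutoff and result insertion order identical.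
import Mathlib
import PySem

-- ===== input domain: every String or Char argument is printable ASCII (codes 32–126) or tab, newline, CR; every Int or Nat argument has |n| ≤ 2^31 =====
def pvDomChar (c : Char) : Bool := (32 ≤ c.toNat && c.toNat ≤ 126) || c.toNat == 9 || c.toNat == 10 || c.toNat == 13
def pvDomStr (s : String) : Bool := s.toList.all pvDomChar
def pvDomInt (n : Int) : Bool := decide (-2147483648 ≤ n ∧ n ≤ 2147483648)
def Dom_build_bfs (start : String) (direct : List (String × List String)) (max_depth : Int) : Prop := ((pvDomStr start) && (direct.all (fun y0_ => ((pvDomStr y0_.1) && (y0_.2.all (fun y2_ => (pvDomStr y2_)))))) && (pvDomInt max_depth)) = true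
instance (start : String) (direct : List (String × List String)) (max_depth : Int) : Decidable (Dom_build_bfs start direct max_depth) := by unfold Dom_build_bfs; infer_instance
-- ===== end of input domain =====

-- B replaces A's level-synchronous recursion by an iterative FIFO-queue BFS carrying
-- (node, depth) pairs (objective: idiomatic / alternative; same asymptotic cost).

-- ===== PORT A =====
-- the body of A's inner 'for node in level_nodes' loop over the state (visited, result, next_nodes)
def stepA (direct : PySem.Dict String (List String))
    (acc : PySem.Set String × PySem.Dict String (List String) × List String)
    (node : String) : PySem.Set String × PySem.Dict String (List String) × List String :=
  if PySem.Set.contains acc.1 node = true then acc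
  else
    let v := PySem.Set.add acc.1 node
    let deps := PySem.Dict.getD direct node []
    (v, acc.2.1.insert node deps,
      acc.2.2 ++ deps.filter (fun d => !(PySem.Set.contains v d)))

-- A's 'rec(level_nodes, depth)'
def recA (direct : PySem.Dict String (List String)) (max_depth : Int)
    (visited : PySem.Set String) (result : PySem.Dict String (List String))
    (level_nodes : List String) (depth : Int) :
    PySem.Set String × PySem.Dict String (List String) :=
  if h : depth > max_depth then (visited, result)
  else
    let acc := level_nodes.foldl (stepA direct) (visited, result, [])
    if acc.2.2 ≠ [] then recA direct max_depth acc.1 acc.2.1 acc.2.2 (depth + 1)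
    else (acc.1, acc.2.1)
termination_by (max_depth + 1 - depth).toNat
decreasing_by omega

def build_bfs (start : String) (direct : List (String × List String)) (max_depth : Int) : List (String × List String) :=
  ((recA (PySem.Dict.mk direct) max_depth PySem.Set.empty PySem.Dict.empty [start] 0).2).items

-- ===== PORT B =====
-- Termination measure for the queue loop: distinct not-yet-visited nodes that can still
-- be popped (queue nodes and every dependency value), then the queue length.
def pvMeasure (direct : PySem.Dict String (List String))
    (queue : List (String × Int)) (visited : PySem.Set String) : Nat :=
  (((queue.map Prod.fst).toFinset ∪ (direct.values.flatten).toFinset) \ visited.toFinset).card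

lemma toFinset_add (s : PySem.Set String) (a : String) :
    (PySem.Set.add s a).toFinset = insert a s.toFinset := by
  rw [PySem.Set.add_eq_ite]
  split
  · next h =>
    exact (Finset.insert_eq_self.mpr (List.mem_toFinset.mpr h)).symm
  · ext y
    simp

lemma mem_getD_flatten (d : PySem.Dict String (List String)) (k x : String)
    (hx : x ∈ PySem.Dict.getD d k []) : x ∈ d.values.flatten := by
  rw [PySem.Dict.getD_eq_get?_getD] at hx
  cases h : PySem.Dict.get? d k with
  | none => rw [h] at hx; simp at hx
  | some vs =>
    rw [h] at hx
    simp only [Option.getD_some] at hx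
    have hitems := PySem.Dict.mem_items_of_get?_eq_some d h
    have hv : vs ∈ d.values := by
      simp only [PySem.Dict.values]
      exact List.mem_map.mpr ⟨(k, vs), hitems, rfl⟩
    exact List.mem_flatten.mpr ⟨vs, hv, hx⟩

lemma pvMeasure_skip (direct : PySem.Dict String (List String))
    (node : String) (dep : Int) (rest : List (String × Int)) (visited : PySem.Set String) :
    pvMeasure direct rest visited ≤ pvMeasure direct ((node, dep) :: rest) visited := by
  apply Finset.card_le_card
  intro x hx
  simp only [Finset.mem_sdiff, Finset.mem_union, List.mem_toFinset, List.mem_map] at hx ⊢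
  obtain ⟨h1, h2⟩ := hx
  refine ⟨?_, h2⟩
  rcases h1 with ⟨a, ha, rfl⟩ | hV
  · exact Or.inl ⟨a, List.mem_cons_of_mem _ ha, rfl⟩
  · exact Or.inr hV

lemma pvMeasure_visit (direct : PySem.Dict String (List String))
    (node : String) (dep k : Int) (rest : List (String × Int)) (visited : PySem.Set String)
    (df : List String) (hdf : ∀ x ∈ df, x ∈ direct.values.flatten)
    (hnode : ¬ PySem.Set.contains visited node = true) :
    pvMeasure direct (rest ++ df.map (fun d => (d, k))) (PySem.Set.add visited node)
      < pvMeasure direct ((node, dep) :: rest) visited := by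
  have hnv : node ∉ visited := by simp at hnode; exact hnode
  apply Finset.card_lt_card
  constructor
  · intro x hx
    simp only [toFinset_add, Finset.mem_sdiff, Finset.mem_union, Finset.mem_insert,
      List.mem_toFinset, List.mem_map, List.mem_append] at hx ⊢
    obtain ⟨h1, h2⟩ := hx
    refine ⟨?_, fun hm => h2 (Or.inr hm)⟩
    rcases h1 with ⟨a, ha | ha, rfl⟩ | hV
    · exact Or.inl ⟨a, List.mem_cons_of_mem _ ha, rfl⟩
    · obtain ⟨d, hd, heq⟩ := ha
      have : a.1 = d := by rw [← heq]
      exact Or.inr (this ▸ hdf d hd)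
    · exact Or.inr hV
  · intro hsub
    have hn : node ∈ (((((node, dep) :: rest).map Prod.fst).toFinset ∪
        (direct.values.flatten).toFinset) \ visited.toFinset) := by
      simp [hnv]
    have := hsub hn
    simp [toFinset_add] at this

-- B's 'while queue:' loop
def recB (direct : PySem.Dict String (List String)) (max_depth : Int)
    (visited : PySem.Set String) (result : PySem.Dict String (List String))
    (queue : List (String × Int)) :
    PySem.Set String × PySem.Dict String (List String) :=
  match queue with
  | [] => (visited, result)
  | (node, depth) :: rest =>
    if h : depth > max_depth ∨ PySem.Set.contains visited node = true then
      recB direct max_depth visited result rest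
    else
      let v := PySem.Set.add visited node
      let deps := PySem.Dict.getD direct node []
      recB direct max_depth v (result.insert node deps)
        (rest ++ (deps.filter (fun d => !(PySem.Set.contains v d))).map (fun d => (d, depth + 1)))
termination_by (pvMeasure direct queue visited, queue.length)
decreasing_by
  · rcases lt_or_eq_of_le (pvMeasure_skip direct node depth rest visited) with hlt | heq
    · exact Prod.Lex.left _ _ hlt
    · rw [heq]; exact Prod.Lex.right _ (by simp)
  · apply Prod.Lex.left
    apply pvMeasure_visit
    · intro x hx
      exact mem_getD_flatten direct node x (List.mem_of_mem_filter hx)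
    · exact fun hc => h (Or.inr hc)

def build_bfs_alt (start : String) (direct : List (String × List String)) (max_depth : Int) : List (String × List String) :=
  ((recB (PySem.Dict.mk direct) max_depth PySem.Set.empty PySem.Dict.empty [(start, 0)]).2).items

-- ===== PRECONDITION & SPEC =====
def Spec_build_bfs (start : String) (direct : List (String × List String)) (max_depth : Int) (out : List (String × List String)) : Prop := out = build_bfs_alt start direct max_depth
instance (start : String) (direct : List (String × List String)) (max_depth : Int) (out : List (String × List String)) : Decidable (Spec_build_bfs start direct max_depth out) := by unfold Spec_build_bfs; infer_instance

-- ===== CLAIM (what is proved, stated in full; the proofs are below) =====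
def Claim_equal_build_bfs : Prop := ∀ (start : String) (direct : List (String × List String)) (max_depth : Int), Dom_build_bfs start direct max_depth → Spec_build_bfs start direct max_depth (build_bfs start direct max_depth)

-- ===== LEMMAS AND PROOFS =====

lemma recB_nil (direct : PySem.Dict String (List String)) (max_depth : Int)
    (visited : PySem.Set String) (result : PySem.Dict String (List String)) :
    recB direct max_depth visited result [] = (visited, result) := by
  rw [recB]

-- entries whose depth exceeds max_depth are all skipped
lemma recB_drain (direct : PySem.Dict String (List String)) (max_depth : Int)
    (queue : List (String × Int)) (visited : PySem.Set String)
    (result : PySem.Dict String (List String))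
    (h : ∀ p ∈ queue, max_depth < p.2) :
    recB direct max_depth visited result queue = (visited, result) := by
  induction queue with
  | nil => exact recB_nil _ _ _ _
  | cons p rest ih =>
    obtain ⟨node, depth⟩ := p
    rw [recB, dif_pos (Or.inl (h (node, depth) List.mem_cons_self))]
    exact ih (fun q hq => h q (List.mem_cons_of_mem _ hq))

-- B consumes one whole depth-'depth' layer exactly as A's inner loop folds over it
lemma recB_level (direct : PySem.Dict String (List String)) (max_depth : Int)
    (depth : Int) (hd : ¬ depth > max_depth) :
    ∀ (L M : List String) (visited : PySem.Set String) (result : PySem.Dict String (List String)),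
    recB direct max_depth visited result
        (L.map (fun n => (n, depth)) ++ M.map (fun n => (n, depth + 1))) =
      recB direct max_depth
        (L.foldl (stepA direct) (visited, result, M)).1
        (L.foldl (stepA direct) (visited, result, M)).2.1
        ((L.foldl (stepA direct) (visited, result, M)).2.2.map (fun n => (n, depth + 1))) := by
  intro L
  induction L with
  | nil => intro M visited result; simp [List.foldl]
  | cons n L' ih =>
    intro M visited result
    simp only [List.map_cons, List.cons_append, List.foldl_cons]
    by_cases hc : PySem.Set.contains visited n = true
    · rw [recB, dif_pos (Or.inr hc)]
      rw [stepA, if_pos hc]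
      exact ih M visited result
    · rw [recB, dif_neg (by tauto)]
      rw [stepA, if_neg hc]
      simp only []
      rw [List.append_assoc, ← List.map_append]
      exact ih (M ++ _) _ _

-- main induction on the remaining depth budget
lemma recB_eq_recA (direct : PySem.Dict String (List String)) (max_depth : Int) :
    ∀ (k : Nat) (depth : Int) (visited : PySem.Set String)
      (result : PySem.Dict String (List String)) (L : List String),
      (max_depth + 1 - depth).toNat ≤ k →
      recB direct max_depth visited result (L.map (fun n => (n, depth))) =
        recA direct max_depth visited result L depth := by
  intro k
  induction k with
  | zero =>
    intro depth visited result L hk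
    have hgt : depth > max_depth := by omega
    rw [recA, dif_pos hgt]
    exact recB_drain _ _ _ _ _ (by
      intro p hp
      obtain ⟨n, _, rfl⟩ := List.mem_map.mp hp
      exact hgt)
  | succ k ih =>
    intro depth visited result L hk
    by_cases hgt : depth > max_depth
    · rw [recA, dif_pos hgt]
      exact recB_drain _ _ _ _ _ (by
        intro p hp
        obtain ⟨n, _, rfl⟩ := List.mem_map.mp hp
        exact hgt)
    · rw [recA, dif_neg hgt]
      have h0 : L.map (fun n => (n, depth)) =
          L.map (fun n => (n, depth)) ++ (([] : List String).map (fun n => (n, depth + 1))) := by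
        simp
      rw [h0, recB_level direct max_depth depth hgt L [] visited result]
      simp only []
      split
      · next hne =>
        exact ih (depth + 1) _ _ _ (by omega)
      · next hne =>
        rw [ne_eq, not_not] at hne
        rw [hne]
        simpa using recB_nil _ _ _ _

-- ===== VERDICT (by name: the statement is the Claim_ definition above) =====
theorem build_bfs_spec : Claim_equal_build_bfs := by
  intro start direct max_depth _
  unfold Spec_build_bfs build_bfs build_bfs_alt
  have h : ([(start, 0)] : List (String × Int)) = [start].map (fun n => (n, 0)) := rfl
  rw [h, recB_eq_recA (PySem.Dict.mk direct) max_depth (max_depth + 1).toNat 0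
    PySem.Set.empty PySem.Dict.empty [start] (by omega)]
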